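-- pv_equiv track=rewrite | github.com/magicolala/oracle | src/oracle/service/prediction.py | parse_time_control
-- ===== SOURCE A (Python) =====
-- def parse_time_control(time_control: str) -> int:
--     phases = time_control.split(":")
--     total_time = 0
--     average_moves = 40
--     increments: list[int] = []
--
--     for phase in phases:
--         if "+" in phase:
--             base, increment = phase.split("+")
--             increments.append(int(increment))
--         else:
--             increments.append(0)
--
--     for i, phase in enumerate(phases):
--         if "/" in phase:
--             moves, base_increment = phase.split("/")
--             base_time = int(base_increment.split("+")[0])
--             moves = int(moves)
--             total_time += base_time + (moves * increments[i])
--         else: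
--             base_time = int(phase.split("+")[0])
--             if i == len(phases) - 1:
--                 total_time += base_time + (average_moves * increments[i])
--             else:
--                 total_time += base_time
--
--     return total_time
-- ===== SOURCE B (Python) =====
-- def _increment(phase: str) -> int:
--     return int(phase.split("+")[1]) if "+" in phase else 0
--
--
-- def _phase_base(phase: str) -> int:
--     if "/" in phase:
--         moves, rest = phase.split("/")
--         return int(rest.split("+")[0]) + int(moves) * _increment(phase)
--     return int(phase.split("+")[0])
--
--
-- def parse_time_control(time_control: str) -> int:
--     def go(phases: list) -> int:
--         head, *rest = phases
--         if rest:
--             return _phase_base(head) + go(rest)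
--         bonus = 0 if "/" in head else 40 * _increment(head)
--         return _phase_base(head) + bonus
--     return go(time_control.split(":"))
-- ===== Notes on version B (the rewrite author's own statement) =====
-- stated objective: simpler
-- what changed: B replaces A's two indexed passes (an increments-list pass plus an enumerate loop with an i==len-1 test) by structural recursion over the phase list: the last phase is the recursion's base case, which alone adds the 40*increment bonus, so no index, enumerate or increments list exists.
import Mathlib
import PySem

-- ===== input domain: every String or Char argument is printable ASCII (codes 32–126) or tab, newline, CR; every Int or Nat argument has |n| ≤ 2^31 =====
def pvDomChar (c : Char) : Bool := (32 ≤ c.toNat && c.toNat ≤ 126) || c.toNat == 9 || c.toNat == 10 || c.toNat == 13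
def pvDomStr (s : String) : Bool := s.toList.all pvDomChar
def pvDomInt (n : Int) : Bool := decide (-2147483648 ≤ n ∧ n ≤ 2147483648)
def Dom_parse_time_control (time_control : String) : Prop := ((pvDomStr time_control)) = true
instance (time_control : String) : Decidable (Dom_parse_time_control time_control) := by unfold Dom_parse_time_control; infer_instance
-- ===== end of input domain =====

-- B replaces A's two indexed passes (increments list + enumerate loop with an i == len-1
-- test) by structural recursion over the phase list; the base case (the last phase) alone
-- adds the 40*increment bonus (objective: simpler). Under Pre_ (where Python A returns
-- normally) the two agree on every input.

-- ===== PORT A =====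
-- s.split(sep) for a nonempty literal sep (split? is none only for sep = "")
def pvSplit (s sep : String) : List String := (PySem.Str.split? s sep).getD []

-- first loop: build the increments list (int(increment) / exactly-one-'+' failures are outside Pre_)
def pvIncrementsA (phases : List String) : List Int :=
  phases.foldl (fun acc phase =>
    acc ++ [if PySem.Str.isIn "+" phase then
              (PySem.Int.ofStr? ((pvSplit phase "+").getD 1 "")).getD 0
            else 0]) []

def parse_time_control (time_control : String) : Int :=
  let phases := pvSplit time_control ":"
  let increments := pvIncrementsA phases
  (PySem.List.enumerate phases).foldl (fun total_time p =>
    let i := p.1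
    let phase := p.2
    if PySem.Str.isIn "/" phase then
      let parts := pvSplit phase "/"
      let base_time := (PySem.Int.ofStr? ((pvSplit (parts.getD 1 "") "+").getD 0 "")).getD 0
      let moves := (PySem.Int.ofStr? (parts.getD 0 "")).getD 0
      total_time + (base_time + moves * PySem.List.pyGetD increments i 0)
    else
      let base_time := (PySem.Int.ofStr? ((pvSplit phase "+").getD 0 "")).getD 0
      if i == (phases.length : Int) - 1 then
        total_time + (base_time + 40 * PySem.List.pyGetD increments i 0)
      else
        total_time + base_time) 0

-- ===== PORT B =====
def pvIncB (phase : String) : Int :=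
  if PySem.Str.isIn "+" phase then
    (PySem.Int.ofStr? ((pvSplit phase "+").getD 1 "")).getD 0
  else 0

def pvPhaseBase (phase : String) : Int :=
  if PySem.Str.isIn "/" phase then
    let parts := pvSplit phase "/"
    (PySem.Int.ofStr? ((pvSplit (parts.getD 1 "") "+").getD 0 "")).getD 0
      + (PySem.Int.ofStr? (parts.getD 0 "")).getD 0 * pvIncB phase
  else
    (PySem.Int.ofStr? ((pvSplit phase "+").getD 0 "")).getD 0

-- go(phases); the [] case is unreachable (split(":") never yields an empty list)
def pvGo : List String → Int
  | [] => 0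
  | head :: rest =>
    if rest.isEmpty then
      pvPhaseBase head + (if PySem.Str.isIn "/" head then 0 else 40 * pvIncB head)
    else
      pvPhaseBase head + pvGo rest

def parse_time_control_alt (time_control : String) : Int :=
  pvGo (pvSplit time_control ":")

-- ===== PRECONDITION & SPEC =====
-- Pre_ holds exactly where Python A returns normally: each ':'-phase must contain at most one
-- '+' and at most one '/', and the substrings A passes to int() must be parseable.
def Pre_parse_time_control (time_control : String) : Prop :=
  ∀ phase ∈ pvSplit time_control ":",
    (PySem.Str.isIn "+" phase = true →
      (pvSplit phase "+").length = 2 ∧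
      (PySem.Int.ofStr? ((pvSplit phase "+").getD 1 "")).isSome = true) ∧
    (if PySem.Str.isIn "/" phase then
      (pvSplit phase "/").length = 2 ∧
      (PySem.Int.ofStr? ((pvSplit ((pvSplit phase "/").getD 1 "") "+").getD 0 "")).isSome = true ∧
      (PySem.Int.ofStr? ((pvSplit phase "/").getD 0 "")).isSome = true
    else
      (PySem.Int.ofStr? ((pvSplit phase "+").getD 0 "")).isSome = true)
instance (time_control : String) : Decidable (Pre_parse_time_control time_control) := by
  unfold Pre_parse_time_control; infer_instance
def pvWitness_parse_time_control : String := "40/5400+30:300+5"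
def Spec_parse_time_control (time_control : String) (out : Int) : Prop := out = parse_time_control_alt time_control
instance (time_control : String) (out : Int) : Decidable (Spec_parse_time_control time_control out) := by unfold Spec_parse_time_control; infer_instance

-- ===== CLAIM (what is proved, stated in full; the proofs are below) =====
def Claim_equal_parse_time_control : Prop := ∀ (time_control : String), Dom_parse_time_control time_control → Pre_parse_time_control time_control → Spec_parse_time_control time_control (parse_time_control time_control)

-- ===== LEMMAS AND PROOFS =====

-- the per-phase increment that A's first loop stores at each position (= pvIncB)
-- and A's per-phase contribution, with an explicit is-last flag
def pvPhaseSeconds (phase : String) (is_last : Bool) : Int :=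
  if PySem.Str.isIn "/" phase then
    let parts := pvSplit phase "/"
    (PySem.Int.ofStr? ((pvSplit (parts.getD 1 "") "+").getD 0 "")).getD 0
      + (PySem.Int.ofStr? (parts.getD 0 "")).getD 0 * pvIncB phase
  else
    (PySem.Int.ofStr? ((pvSplit phase "+").getD 0 "")).getD 0
      + (if is_last then 40 * pvIncB phase else 0)

theorem pvIncrementsA_eq_map (phases : List String) :
    pvIncrementsA phases = phases.map pvIncB := by
  unfold pvIncrementsA
  rw [PySem.List.foldl_append_singleton_eq_map]
  rfl

theorem pvSeconds_false (phase : String) :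
    pvPhaseSeconds phase false = pvPhaseBase phase := by
  simp only [pvPhaseSeconds, pvPhaseBase, Bool.false_eq_true, if_false, add_zero]

theorem pvSeconds_true (phase : String) :
    pvPhaseSeconds phase true
      = pvPhaseBase phase + (if PySem.Str.isIn "/" phase then 0 else 40 * pvIncB phase) := by
  simp only [pvPhaseSeconds, pvPhaseBase, if_true]
  split_ifs <;> ring

-- A's enumerate sum equals B's recursion, generalizing the enumerate start index
theorem pvSum_eq_go (phases : List String) : ∀ s : Int,
    ((PySem.List.enumerate phases s).map
      (fun p => pvPhaseSeconds p.2 (p.1 == s + (phases.length : Int) - 1))).sum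
      = pvGo phases := by
  induction phases with
  | nil => intro s; simp [PySem.List.enumerate_nil, pvGo]
  | cons head rest ih =>
    intro s
    cases rest with
    | nil =>
      simp [PySem.List.enumerate_cons, PySem.List.enumerate_nil, pvSeconds_true, pvGo]
    | cons b tl =>
      rw [PySem.List.enumerate_cons, List.map_cons, List.sum_cons]
      have hflag : (s == s + (((head :: b :: tl).length : Nat) : Int) - 1) = false := by
        simp only [beq_eq_false_iff_ne, ne_eq, List.length_cons]
        push_cast
        omega
      have hlen : s + (((head :: b :: tl).length : Nat) : Int) - 1
          = (s + 1) + (((b :: tl).length : Nat) : Int) - 1 := by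
        push_cast [List.length_cons]
        ring
      rw [hflag, pvSeconds_false]
      have htail : ((PySem.List.enumerate (b :: tl) (s + 1)).map
          (fun p => pvPhaseSeconds p.2 (p.1 == s + (((head :: b :: tl).length : Nat) : Int) - 1))).sum
          = ((PySem.List.enumerate (b :: tl) (s + 1)).map
          (fun p => pvPhaseSeconds p.2 (p.1 == (s + 1) + (((b :: tl).length : Nat) : Int) - 1))).sum := by
        rw [hlen]
      rw [htail, ih (s + 1)]
      simp [pvGo]

theorem pvMain (time_control : String) :
    parse_time_control time_control = parse_time_control_alt time_control := by
  simp only [parse_time_control, parse_time_control_alt, pvIncrementsA_eq_map]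
  generalize pvSplit time_control ":" = phases
  -- rewrite A's fold body into `acc + f p` using membership facts, then use foldl_add
  have hcong : (PySem.List.enumerate phases).foldl (fun total_time p =>
      let i := p.1
      let phase := p.2
      if PySem.Str.isIn "/" phase then
        let parts := pvSplit phase "/"
        let base_time := (PySem.Int.ofStr? ((pvSplit (parts.getD 1 "") "+").getD 0 "")).getD 0
        let moves := (PySem.Int.ofStr? (parts.getD 0 "")).getD 0
        total_time + (base_time + moves * PySem.List.pyGetD (phases.map pvIncB) i 0)
      else
        let base_time := (PySem.Int.ofStr? ((pvSplit phase "+").getD 0 "")).getD 0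
        if i == (phases.length : Int) - 1 then
          total_time + (base_time + 40 * PySem.List.pyGetD (phases.map pvIncB) i 0)
        else
          total_time + base_time) 0
      = (PySem.List.enumerate phases).foldl
          (fun total_time p => total_time + pvPhaseSeconds p.2 (p.1 == (phases.length : Int) - 1)) 0 := by
    apply PySem.List.foldl_congr_mem
    intro a p hp'
    rcases (PySem.List.mem_enumerate_iff phases 0 p).mp hp' with ⟨k, hk, rfl⟩
    have hget : PySem.List.pyGetD (phases.map pvIncB) ((0 : Int) + k) 0 = pvIncB (phases[k]) := by
      have h0 : ((0 : Int) + k) = (k : Int) := by omega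
      rw [h0, PySem.List.pyGetD_natCast]
      simp [hk]
    simp only [hget, pvPhaseSeconds]
    split_ifs <;> ring
  rw [hcong, PySem.List.foldl_add]
  have := pvSum_eq_go phases 0
  simpa using this

-- ===== VERDICT (by name: the statement is the Claim_ definition above) =====
theorem parse_time_control_spec : Claim_equal_parse_time_control := by
  intro tc _ _
  unfold Spec_parse_time_control
  exact pvMain tc
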